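-- pv_equiv track=rewrite | github.com/zrma/1d1python | src/hacker_rank/python/sets.py | no_idea
-- ===== SOURCE A (Python) =====
-- from typing import Sequence
--
-- def no_idea(arr: Sequence[int], s1: set[int], s2: set[int]) -> int:
--     s1_1 = s1 - s2
--     s2_1 = s2 - s1
--
--     happiness = 0
--     for i in arr:
--         if i in s1_1:
--             happiness += 1
--
--     for i in arr:
--         if i in s2_1:
--             happiness -= 1
--
--     return happiness
-- ===== SOURCE B (Python) =====
-- from typing import Sequence
--
--
-- def no_idea(arr: Sequence[int], s1: set, s2: set) -> int:
--     count = {}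
--     for i in arr:
--         count[i] = count.get(i, 0) + 1
--     return sum(count.get(x, 0) for x in s1) - sum(count.get(x, 0) for x in s2)
-- ===== Notes on version B (the rewrite author's own statement) =====
-- stated objective: alternative
-- what changed: Instead of computing two set differences and scanning the array twice with membership tests, B builds a frequency dictionary of the array in one pass and sums the counts over the elements of s1 minus the counts over s2 (elements in both sets cancel exactly as the set differences do).
import Mathlib
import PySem

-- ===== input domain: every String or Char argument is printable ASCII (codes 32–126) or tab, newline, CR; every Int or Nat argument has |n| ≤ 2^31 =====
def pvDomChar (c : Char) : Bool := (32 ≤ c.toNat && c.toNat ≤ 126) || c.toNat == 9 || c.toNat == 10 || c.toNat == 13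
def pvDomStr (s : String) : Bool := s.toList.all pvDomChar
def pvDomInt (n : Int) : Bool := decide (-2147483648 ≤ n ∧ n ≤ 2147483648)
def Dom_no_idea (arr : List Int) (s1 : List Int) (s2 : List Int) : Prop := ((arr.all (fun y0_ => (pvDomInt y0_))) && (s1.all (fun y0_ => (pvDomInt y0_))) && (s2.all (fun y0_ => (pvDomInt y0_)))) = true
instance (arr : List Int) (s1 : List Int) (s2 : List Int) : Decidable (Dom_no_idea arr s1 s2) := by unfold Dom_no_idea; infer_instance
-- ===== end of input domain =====

-- B replaces A's two set differences + two array scans by one frequency dictionary of the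
-- array and per-set sums of counts (alternative decomposition, same exact result).

-- ===== PORT A =====
-- s1, s2 are Python sets (distinct elements); set operations go through PySem.Set.
def no_idea (arr : List Int) (s1 : List Int) (s2 : List Int) : Int :=
  let s1_1 := PySem.Set.diff (PySem.Set.ofList s1) (PySem.Set.ofList s2)
  let s2_1 := PySem.Set.diff (PySem.Set.ofList s2) (PySem.Set.ofList s1)
  let happiness : Int := 0
  let happiness := arr.foldl (fun h i => if PySem.Set.contains s1_1 i then h + 1 else h) happiness
  let happiness := arr.foldl (fun h i => if PySem.Set.contains s2_1 i then h - 1 else h) happiness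
  happiness

-- ===== PORT B =====
-- count = {}; for i in arr: count[i] = count.get(i, 0) + 1; then sum over each set.
def no_idea_alt (arr : List Int) (s1 : List Int) (s2 : List Int) : Int :=
  let count := arr.foldl (fun d i => d.insert i (d.getD i 0 + 1)) (PySem.Dict.empty : PySem.Dict Int Int)
  (PySem.Set.ofList s1).foldl (fun a x => a + count.getD x 0) 0
    - (PySem.Set.ofList s2).foldl (fun a x => a + count.getD x 0) 0

-- ===== PRECONDITION & SPEC =====
def Spec_no_idea (arr : List Int) (s1 : List Int) (s2 : List Int) (out : Int) : Prop := out = no_idea_alt arr s1 s2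
instance (arr : List Int) (s1 : List Int) (s2 : List Int) (out : Int) : Decidable (Spec_no_idea arr s1 s2 out) := by unfold Spec_no_idea; infer_instance

-- ===== CLAIM (what is proved, stated in full; the proofs are below) =====
def Claim_equal_no_idea : Prop := ∀ (arr : List Int) (s1 : List Int) (s2 : List Int), Dom_no_idea arr s1 s2 → Spec_no_idea arr s1 s2 (no_idea arr s1 s2)

-- ===== LEMMAS AND PROOFS =====

-- counting loop with +1 = filter length
theorem foldl_incr (p : Int → Bool) : ∀ (l : List Int) (c : Int),
    l.foldl (fun h i => if p i then h + 1 else h) c = c + ((l.filter p).length : Int)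
  | [], c => by simp
  | i :: l, c => by
      by_cases h : p i
      · simp [List.foldl_cons, h, foldl_incr p l]; ring
      · simp [List.foldl_cons, h, foldl_incr p l]

-- counting loop with -1 = minus filter length
theorem foldl_decr (p : Int → Bool) : ∀ (l : List Int) (c : Int),
    l.foldl (fun h i => if p i then h - 1 else h) c = c - ((l.filter p).length : Int)
  | [], c => by simp
  | i :: l, c => by
      by_cases h : p i
      · simp [List.foldl_cons, h, foldl_decr p l]; ring
      · simp [List.foldl_cons, h, foldl_decr p l]

theorem sum_map_add (f g : Int → Int) : ∀ (l : List Int),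
    (l.map (fun x => f x + g x)).sum = (l.map f).sum + (l.map g).sum
  | [] => by simp
  | x :: l => by simp [sum_map_add f g l]; ring

theorem sum_indicator (i : Int) : ∀ (l : List Int), l.Nodup →
    (l.map (fun x => if x = i then (1 : Int) else 0)).sum = if i ∈ l then 1 else 0
  | [], _ => by simp
  | x :: l, h => by
      rcases List.nodup_cons.mp h with ⟨hx, hl⟩
      by_cases hxi : x = i
      · subst hxi
        simp [sum_indicator x l hl, hx]
      · simp [hxi, sum_indicator i l hl, Ne.symm hxi]

theorem main_lemma (s1 s2 : List Int) : ∀ (arr : List Int),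
    (((arr.filter (fun i => PySem.Set.contains (PySem.Set.diff (PySem.Set.ofList s1) (PySem.Set.ofList s2)) i)).length : Int)
      - ((arr.filter (fun i => PySem.Set.contains (PySem.Set.diff (PySem.Set.ofList s2) (PySem.Set.ofList s1)) i)).length : Int))
    = ((PySem.Set.ofList s1).map (fun x => (arr.count x : Int))).sum
      - ((PySem.Set.ofList s2).map (fun x => (arr.count x : Int))).sum
  | [] => by simp
  | i :: arr => by
      have hcount : ∀ (d : List Int),
          (d.map (fun x => (((i :: arr).count x : Nat) : Int))).sum
            = (d.map (fun x => ((arr.count x : Nat) : Int))).sum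
              + (d.map (fun x => if x = i then (1 : Int) else 0)).sum := by
        intro d
        rw [← sum_map_add]
        congr 1
        apply List.map_congr_left
        intro x _
        by_cases hx : x = i
        · simp [hx]
        · simp [hx, Ne.symm hx]
      have h1 := hcount (PySem.Set.ofList s1)
      have h2 := hcount (PySem.Set.ofList s2)
      rw [h1, h2, sum_indicator i _ (PySem.Set.nodup_ofList s1),
          sum_indicator i _ (PySem.Set.nodup_ofList s2)]
      have ih := main_lemma s1 s2 arr
      by_cases m1 : i ∈ s1 <;> by_cases m2 : i ∈ s2 <;>
        simp [PySem.Set.mem_diff, PySem.Set.mem_ofList, m1, m2] at ih ⊢ <;>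
        omega

-- ===== VERDICT (by name: the statement is the Claim_ definition above) =====
theorem no_idea_spec : Claim_equal_no_idea := by
  intro arr s1 s2 _
  unfold Spec_no_idea no_idea no_idea_alt
  dsimp only
  rw [PySem.Dict.foldl_insert_getD_add_one_eq_counter]
  rw [foldl_incr, foldl_decr, PySem.List.foldl_add, PySem.List.foldl_add]
  simp only [PySem.Dict.getD_counter, zero_add]
  have := main_lemma s1 s2 arr
  omega
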